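-- pv_equiv track=rewrite | github.com/44r0nqtp2t43vr/FreeAI | modules/validators.py | validate_L3_08
-- ===== SOURCE A (Python) =====
-- def validate_L3_08(statement_type, tags_list):
--     tags = [tagged_word[1] for tagged_word in tags_list]
--     if 'operator_ari' in tags and 'number' in tags:
--         operator_ari = tags_list[tags.index('operator_ari')][0]
--         number = tags_list[tags.index('number')][0]
--     else:
--         return False
--     int_indices = [index for index in range(len(tags_list)) if tags_list[index][1] == 'int']
--     varname_indices = [index for index in range(len(tags_list)) if tags_list[index][1] == 'var_name']
--     function_indices = [index for index in range(len(tags_list)) if tags_list[index][1] == 'function_name']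
--     if statement_type == 'function' and (len(varname_indices) == 4 and (len(function_indices) == 1 and len(int_indices) == 3)):
--         if tags_list[0][1] == 'int' and (tags_list[function_indices[0]][0] == 'getkey' and (operator_ari == '+' and number == '2')):
--             if tags_list[varname_indices[0]][0] == 'humankey' and tags_list[varname_indices[2]][0] == 'humankey':
--                 if tags_list[varname_indices[1]][0] == 'finalkey' and tags_list[varname_indices[3]][0] == 'finalkey':
--                     return True
--     return False
-- ===== SOURCE B (Python) =====
-- def validate_L3_08(statement_type, tags_list):
--     # Streaming state machine: one left-to-right pass checks each interesting
--     # token against its expected word at the moment its occurrence number is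
--     # known, keeping only five counters and a running boolean; no index lists,
--     # no positional lookups afterwards.
--     n_var = n_fun = n_int = n_op = n_num = 0
--     ok = True
--     for word, tag in tags_list:
--         if tag == 'var_name':
--             if n_var == 0 or n_var == 2:
--                 ok = ok and word == 'humankey'
--             elif n_var == 1 or n_var == 3:
--                 ok = ok and word == 'finalkey'
--             n_var += 1
--         elif tag == 'function_name':
--             if n_fun == 0:
--                 ok = ok and word == 'getkey'
--             n_fun += 1
--         elif tag == 'int':
--             n_int += 1
--         elif tag == 'operator_ari':
--             if n_op == 0:
--                 ok = ok and word == '+'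
--             n_op += 1
--         elif tag == 'number':
--             if n_num == 0:
--                 ok = ok and word == '2'
--             n_num += 1
--     return (ok and statement_type == 'function'
--             and n_var == 4 and n_fun == 1 and n_int == 3
--             and n_op > 0 and n_num > 0
--             and tags_list[0][1] == 'int')
-- ===== Notes on version B (the rewrite author's own statement) =====
-- stated objective: alternative
-- what changed: A's staged scans (membership tests, .index lookups, three index-list comprehensions, then positional lookups) are replaced by a single streaming state machine that checks each token's word against its expectation the moment its occurrence number is reached, maintaining only five counters and a running boolean.
import Mathlib
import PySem

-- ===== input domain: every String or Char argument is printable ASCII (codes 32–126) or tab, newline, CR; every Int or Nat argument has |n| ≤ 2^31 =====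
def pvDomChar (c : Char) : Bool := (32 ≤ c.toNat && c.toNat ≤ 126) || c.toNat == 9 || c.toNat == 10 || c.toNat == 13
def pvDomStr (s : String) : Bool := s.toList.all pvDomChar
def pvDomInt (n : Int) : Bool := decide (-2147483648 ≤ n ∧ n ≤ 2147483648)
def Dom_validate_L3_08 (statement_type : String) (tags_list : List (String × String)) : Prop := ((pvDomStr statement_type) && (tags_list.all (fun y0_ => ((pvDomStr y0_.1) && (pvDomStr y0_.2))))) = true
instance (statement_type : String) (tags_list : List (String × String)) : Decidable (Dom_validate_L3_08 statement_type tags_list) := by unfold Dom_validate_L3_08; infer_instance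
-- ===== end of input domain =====

-- B replaces A's staged scans (membership tests, .index lookups, three index-list
-- comprehensions, positional lookups) by ONE streaming pass: a state machine of five
-- counters plus a running boolean that checks each token's word the moment its
-- occurrence number is reached; objective: alternative (same asymptotic cost).

-- ===== PORT A =====
-- word at tags_list[idxs[j]] for an index list idxs (A's 'tags_list[varname_indices[j]][0]')
def pvWordAt (tags_list : List (String × String)) (idxs : List Int) (j : Int) : Option String :=
  ((PySem.List.pyGet? idxs j).bind (fun k => PySem.List.pyGet? tags_list k)).map (fun p => p.1)

def validate_L3_08 (statement_type : String) (tags_list : List (String × String)) : Bool :=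
  let tags := tags_list.map (fun tw => tw.2)
  if tags.contains "operator_ari" && tags.contains "number" then
    let operator_ari := ((PySem.List.index? tags "operator_ari").bind
        (fun i => PySem.List.pyGet? tags_list (i : Int))).map (fun p => p.1)
    let number := ((PySem.List.index? tags "number").bind
        (fun i => PySem.List.pyGet? tags_list (i : Int))).map (fun p => p.1)
    let int_indices := (PySem.List.pyRange 0 tags_list.length 1).filter
        (fun k => (PySem.List.pyGet? tags_list k).map (fun p => p.2) == some "int")
    let varname_indices := (PySem.List.pyRange 0 tags_list.length 1).filter
        (fun k => (PySem.List.pyGet? tags_list k).map (fun p => p.2) == some "var_name")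
    let function_indices := (PySem.List.pyRange 0 tags_list.length 1).filter
        (fun k => (PySem.List.pyGet? tags_list k).map (fun p => p.2) == some "function_name")
    if statement_type == "function" && (varname_indices.length == 4 &&
        (function_indices.length == 1 && int_indices.length == 3)) then
      if ((PySem.List.pyGet? tags_list 0).map (fun p => p.2) == some "int") &&
         (pvWordAt tags_list function_indices 0 == some "getkey" &&
          (operator_ari == some "+" && number == some "2")) then
        if pvWordAt tags_list varname_indices 0 == some "humankey" &&
           pvWordAt tags_list varname_indices 2 == some "humankey" then
          if pvWordAt tags_list varname_indices 1 == some "finalkey" &&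
             pvWordAt tags_list varname_indices 3 == some "finalkey" then
            true
          else false
        else false
      else false
    else false
  else false

-- ===== PORT B =====
-- one step of Source B's loop body on the state ((n_var, n_fun, n_int, n_op, n_num), ok)
def pvStepB (s : (Nat × Nat × Nat × Nat × Nat) × Bool) (wt : String × String) :
    (Nat × Nat × Nat × Nat × Nat) × Bool :=
  let nv := s.1.1; let nf := s.1.2.1; let ni := s.1.2.2.1
  let no := s.1.2.2.2.1; let nn := s.1.2.2.2.2; let ok := s.2
  if wt.2 == "var_name" then
    ((nv + 1, nf, ni, no, nn),
      if nv == 0 || nv == 2 then ok && (wt.1 == "humankey")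
      else if nv == 1 || nv == 3 then ok && (wt.1 == "finalkey")
      else ok)
  else if wt.2 == "function_name" then
    ((nv, nf + 1, ni, no, nn), if nf == 0 then ok && (wt.1 == "getkey") else ok)
  else if wt.2 == "int" then
    ((nv, nf, ni + 1, no, nn), ok)
  else if wt.2 == "operator_ari" then
    ((nv, nf, ni, no + 1, nn), if no == 0 then ok && (wt.1 == "+") else ok)
  else if wt.2 == "number" then
    ((nv, nf, ni, no, nn + 1), if nn == 0 then ok && (wt.1 == "2") else ok)
  else s

def validate_L3_08_alt (statement_type : String) (tags_list : List (String × String)) : Bool :=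
  let s := tags_list.foldl pvStepB ((0, 0, 0, 0, 0), true)
  s.2 && (statement_type == "function")
    && (s.1.1 == 4) && (s.1.2.1 == 1) && (s.1.2.2.1 == 3)
    && decide (0 < s.1.2.2.2.1) && decide (0 < s.1.2.2.2.2)
    && ((PySem.List.pyGet? tags_list 0).map (fun p => p.2) == some "int")

-- ===== PRECONDITION & SPEC =====
def Spec_validate_L3_08 (statement_type : String) (tags_list : List (String × String)) (out : Bool) : Prop := out = validate_L3_08_alt statement_type tags_list
instance (statement_type : String) (tags_list : List (String × String)) (out : Bool) : Decidable (Spec_validate_L3_08 statement_type tags_list out) := by unfold Spec_validate_L3_08; infer_instance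

-- ===== CLAIM (what is proved, stated in full; the proofs are below) =====
def Claim_equal_validate_L3_08 : Prop := ∀ (statement_type : String) (tags_list : List (String × String)), Dom_validate_L3_08 statement_type tags_list → Spec_validate_L3_08 statement_type tags_list (validate_L3_08 statement_type tags_list)

-- ===== LEMMAS AND PROOFS =====

-- the running 'ok' generated by Source B's loop over tl, started at occurrence counters nv nf no nn
def pvOk : Nat → Nat → Nat → Nat → List (String × String) → Bool
  | _, _, _, _, [] => true
  | nv, nf, no, nn, wt :: rest =>
    if wt.2 == "var_name" then
      (if nv == 0 || nv == 2 then (wt.1 == "humankey")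
       else if nv == 1 || nv == 3 then (wt.1 == "finalkey") else true) && pvOk (nv + 1) nf no nn rest
    else if wt.2 == "function_name" then
      (if nf == 0 then (wt.1 == "getkey") else true) && pvOk nv (nf + 1) no nn rest
    else if wt.2 == "int" then pvOk nv nf no nn rest
    else if wt.2 == "operator_ari" then
      (if no == 0 then (wt.1 == "+") else true) && pvOk nv nf (no + 1) nn rest
    else if wt.2 == "number" then
      (if nn == 0 then (wt.1 == "2") else true) && pvOk nv nf no (nn + 1) rest
    else pvOk nv nf no nn rest

theorem pv_fold (tl : List (String × String)) (nv nf ni no nn : Nat) (ok : Bool) :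
    tl.foldl pvStepB ((nv, nf, ni, no, nn), ok) =
      ((nv + (tl.filter (fun p => p.2 == "var_name")).length,
        nf + (tl.filter (fun p => p.2 == "function_name")).length,
        ni + (tl.filter (fun p => p.2 == "int")).length,
        no + (tl.filter (fun p => p.2 == "operator_ari")).length,
        nn + (tl.filter (fun p => p.2 == "number")).length),
       ok && pvOk nv nf no nn tl) := by
  induction tl generalizing nv nf ni no nn ok with
  | nil => simp [pvOk]
  | cons wt rest ih =>
    obtain ⟨w, t⟩ := wt
    by_cases h1 : t = "var_name"
    · subst h1
      simp only [List.foldl_cons, pvStepB]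
      split_ifs <;>
        (rw [ih]; clear ih; simp_all [pvOk, List.filter_cons,
          Nat.add_assoc, Nat.add_comm, Nat.add_left_comm, Bool.and_assoc])
    · have hb1 : (t == "var_name") = false := by simpa using h1
      by_cases h2 : t = "function_name"
      · subst h2
        simp only [List.foldl_cons, pvStepB]
        split_ifs <;>
          (rw [ih]; clear ih; simp_all [pvOk, List.filter_cons,
            Nat.add_assoc, Nat.add_comm, Nat.add_left_comm, Bool.and_assoc])
      · have hb2 : (t == "function_name") = false := by simpa using h2
        by_cases h3 : t = "int"
        · subst h3
          simp only [List.foldl_cons, pvStepB]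
          split_ifs <;>
            (rw [ih]; clear ih; simp_all [pvOk, List.filter_cons,
              Nat.add_assoc, Nat.add_comm, Nat.add_left_comm, Bool.and_assoc])
        · have hb3 : (t == "int") = false := by simpa using h3
          by_cases h4 : t = "operator_ari"
          · subst h4
            simp only [List.foldl_cons, pvStepB]
            split_ifs <;>
              (rw [ih]; clear ih; simp_all [pvOk, List.filter_cons,
                Nat.add_assoc, Nat.add_comm, Nat.add_left_comm, Bool.and_assoc])
          · have hb4 : (t == "operator_ari") = false := by simpa using h4
            by_cases h5 : t = "number"
            · subst h5
              simp only [List.foldl_cons, pvStepB]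
              split_ifs <;>
                (rw [ih]; clear ih; simp_all [pvOk, List.filter_cons,
                  Nat.add_assoc, Nat.add_comm, Nat.add_left_comm, Bool.and_assoc])
            · have hb5 : (t == "number") = false := by simpa using h5
              simp only [List.foldl_cons, pvStepB, hb1, hb2, hb3, hb4, hb5,
                Bool.false_eq_true, if_false]
              rw [ih]; clear ih
              simp [pvOk, List.filter_cons, hb1, hb2, hb3, hb4, hb5]
-- first-occurrence word check starting at occurrence counter n
def pvChk1 (n : Nat) (c : String) (l : List (String × String)) : Bool :=
  if n == 0 then
    match l with
    | [] => true
    | p :: _ => p.1 == c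
  else true

-- var_name occurrence-pattern check starting at occurrence counter nv
def pvChkV : Nat → List (String × String) → Bool
  | _, [] => true
  | nv, p :: rest =>
    (if nv == 0 || nv == 2 then (p.1 == "humankey")
     else if nv == 1 || nv == 3 then (p.1 == "finalkey") else true) && pvChkV (nv + 1) rest

theorem pv_ok_eq (tl : List (String × String)) (nv nf no nn : Nat) :
    pvOk nv nf no nn tl =
      (pvChkV nv (tl.filter (fun p => p.2 == "var_name")) &&
       pvChk1 nf "getkey" (tl.filter (fun p => p.2 == "function_name")) &&
       pvChk1 no "+" (tl.filter (fun p => p.2 == "operator_ari")) &&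
       pvChk1 nn "2" (tl.filter (fun p => p.2 == "number"))) := by
  induction tl generalizing nv nf no nn with
  | nil => simp [pvOk, pvChkV, pvChk1]
  | cons wt rest ih =>
    obtain ⟨w, t⟩ := wt
    by_cases h1 : t = "var_name"
    · simp only [pvOk, h1, beq_self_eq_true, if_pos, ih, List.filter_cons, pvChkV]
      simp [Bool.and_assoc]
    · by_cases h2 : t = "function_name"
      · simp only [pvOk, h1, h2, beq_self_eq_true, beq_iff_eq, if_pos, if_neg, ih,
          List.filter_cons, pvChk1]
        by_cases hnf : nf = 0 <;>
          simp [h1, hnf, Bool.and_assoc, Bool.and_comm, Bool.and_left_comm]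
      · by_cases h3 : t = "int"
        · simp only [pvOk, h1, h2, h3, beq_self_eq_true, beq_iff_eq, if_pos, if_neg, ih,
            List.filter_cons]
          simp [h1, h2]
        · by_cases h4 : t = "operator_ari"
          · simp only [pvOk, h1, h2, h3, h4, beq_self_eq_true, beq_iff_eq, if_pos, if_neg, ih,
              List.filter_cons, pvChk1]
            by_cases hno : no = 0 <;>
              simp [h1, h2, h3, hno, Bool.and_assoc, Bool.and_comm, Bool.and_left_comm]
          · by_cases h5 : t = "number"
            · simp only [pvOk, h1, h2, h3, h4, h5, beq_self_eq_true, beq_iff_eq, if_pos,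
                if_neg, ih, List.filter_cons, pvChk1]
              by_cases hnn : nn = 0 <;>
                simp [h1, h2, h3, h4, hnn, Bool.and_assoc, Bool.and_comm, Bool.and_left_comm]
            · simp only [pvOk, h1, h2, h3, h4, h5, beq_iff_eq, if_neg, ih, List.filter_cons]
              simp [h1, h2, h3, h4, h5]

-- bridging: counter/streaming checks = positional checks on the filtered list
theorem pv_chkV4 (l : List (String × String)) :
    ((l.length == 4 : Bool) && pvChkV 0 l) =
      ((l.length == 4 : Bool) &&
       ((l[0]?.map (fun p => p.1) == some "humankey") &&
        ((l[2]?.map (fun p => p.1) == some "humankey") &&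
         ((l[1]?.map (fun p => p.1) == some "finalkey") &&
          (l[3]?.map (fun p => p.1) == some "finalkey"))))) := by
  match l with
  | [] => simp
  | [a] => simp
  | [a, b] => simp
  | [a, b, c] => simp
  | [a, b, c, d] =>
    simp [pvChkV, Bool.and_comm, Bool.and_left_comm, Bool.and_assoc]
  | a :: b :: c :: d :: e :: rest =>
    have h : ((a :: b :: c :: d :: e :: rest).length == 4) = false := by
      simp [List.length_cons]
    simp [h]

theorem pv_chkF1 (l : List (String × String)) :
    ((l.length == 1 : Bool) && pvChk1 0 "getkey" l) =
      ((l.length == 1 : Bool) && (l[0]?.map (fun p => p.1) == some "getkey")) := by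
  cases l with
  | nil => simp
  | cons a t => simp [pvChk1]

theorem pv_chkHead (c : String) (l : List (String × String)) :
    (decide (0 < l.length) && pvChk1 0 c l) = (l[0]?.map (fun p => p.1) == some c) := by
  cases l with
  | nil => simp [pvChk1]
  | cons a t => simp [pvChk1]

-- ===== A-side lemmas (A's staged scans, reduced to the filtered list) =====
theorem pv_index_bind (tl : List (String × String)) (tag : String) :
    ((PySem.List.index? (tl.map (fun tw => tw.2)) tag).bind
        (fun i => PySem.List.pyGet? tl (i : Int))) = tl.find? (fun p => p.2 == tag) := by
  induction tl with
  | nil => simp [PySem.List.index?]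
  | cons a t ih =>
    by_cases h : a.2 = tag
    · subst h
      rw [List.map_cons, PySem.List.index?_cons_self]
      simp [List.find?]
    · rw [List.map_cons, PySem.List.index?_cons_of_ne _ (by simpa using h),
        List.find?_cons_of_neg (by simpa using h), ← ih]
      cases hi : PySem.List.index? (t.map fun tw => tw.2) tag with
      | none => rfl
      | some i =>
        simp only [Option.map_some, Option.bind_some]
        have hc : ((i + 1 : Nat) : Int) = (i : Int) + 1 := by push_cast; ring
        rw [hc, PySem.List.pyGet?_cons_succ]

theorem pv_aux_bind (l : List (String × String)) (tag : String) (j : Nat) :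
    (((List.range l.length).filter (fun k => (l[k]?.map (fun p => p.2)) == some tag))[j]?).bind
      (fun k => l[k]?) = (l.filter (fun p => p.2 == tag))[j]? := by
  induction l generalizing j with
  | nil => simp
  | cons a t ih =>
    rw [List.length_cons, List.range_succ_eq_map, List.filter_cons, List.filter_map]
    have hpred : ((fun k => ((a :: t)[k]?.map (fun p => p.2)) == some tag) ∘ Nat.succ)
        = (fun k => (t[k]?.map (fun p => p.2)) == some tag) := by
      funext k; simp
    rw [hpred]
    have hbm : ∀ (o : Option Nat), (o.map Nat.succ).bind (fun k => (a :: t)[k]?)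
        = o.bind (fun k => t[k]?) := by intro o; cases o <;> simp
    by_cases h : a.2 = tag
    · simp only [List.getElem?_cons_zero, Option.map_some, h, beq_self_eq_true, if_pos]
      rw [List.filter_cons_of_pos (by simpa using h)]
      cases j with
      | zero => simp
      | succ j =>
        rw [List.getElem?_cons_succ, List.getElem?_cons_succ, List.getElem?_map, hbm, ih j]
    · have hb : ((some a.2 : Option String) == some tag) = false := by simpa using h
      simp only [List.getElem?_cons_zero, Option.map_some, hb, Bool.false_eq_true, if_false]
      rw [List.filter_cons_of_neg (by simpa using h), List.getElem?_map, hbm, ih j]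

theorem pv_aux_len (l : List (String × String)) (tag : String) :
    ((List.range l.length).filter (fun k => (l[k]?.map (fun p => p.2)) == some tag)).length
      = (l.filter (fun p => p.2 == tag)).length := by
  induction l with
  | nil => simp
  | cons a t ih =>
    rw [List.length_cons, List.range_succ_eq_map, List.filter_cons, List.filter_map]
    have hpred : ((fun k => ((a :: t)[k]?.map (fun p => p.2)) == some tag) ∘ Nat.succ)
        = (fun k => (t[k]?.map (fun p => p.2)) == some tag) := by
      funext k; simp
    rw [hpred]
    by_cases h : a.2 = tag
    · rw [List.filter_cons_of_pos (by simpa using h)]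
      simp [h, ih]
    · have hb : ((some a.2 : Option String) == some tag) = false := by simpa using h
      rw [List.filter_cons_of_neg (by simpa using h)]
      simp [hb, ih]

theorem pv_idxs_eq (tl : List (String × String)) (tag : String) :
    ((PySem.List.pyRange 0 tl.length 1).filter
        (fun k => (PySem.List.pyGet? tl k).map (fun p => p.2) == some tag)) =
      ((List.range tl.length).filter (fun k => (tl[k]?.map (fun p => p.2)) == some tag)).map
        (fun (k : Nat) => (k : Int)) := by
  rw [PySem.List.pyRange_zero_natCast, List.filter_map]
  refine congrArg _ (List.filter_congr ?_)
  intro k _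
  simp

theorem pv_idxs_len (tl : List (String × String)) (tag : String) :
    ((PySem.List.pyRange 0 tl.length 1).filter
        (fun k => (PySem.List.pyGet? tl k).map (fun p => p.2) == some tag)).length =
      (tl.filter (fun p => p.2 == tag)).length := by
  rw [pv_idxs_eq, List.length_map, pv_aux_len]

theorem pv_wordAt (tl : List (String × String)) (tag : String) (j : Nat) :
    pvWordAt tl ((PySem.List.pyRange 0 tl.length 1).filter
        (fun k => (PySem.List.pyGet? tl k).map (fun p => p.2) == some tag)) (j : Int) =
      ((tl.filter (fun p => p.2 == tag))[j]?).map (fun p => p.1) := by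
  unfold pvWordAt
  rw [pv_idxs_eq, PySem.List.pyGet?_natCast, List.getElem?_map]
  rw [← pv_aux_bind tl tag j]
  cases ((List.range tl.length).filter (fun k => (tl[k]?.map (fun p => p.2)) == some tag))[j]? with
  | none => rfl
  | some k => simp

theorem pv_if_and (c x : Bool) : (if c = true then x else false) = (c && x) := by
  cases c <;> simp

theorem pv_contains_filter (tl : List (String × String)) (tag : String) :
    (tl.map (fun tw => tw.2)).contains tag = decide (0 < (tl.filter (fun p => p.2 == tag)).length) := by
  induction tl with
  | nil => simp
  | cons a t ih =>
    rw [List.map_cons, List.contains_cons, ih]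
    by_cases h : a.2 = tag
    · simp [List.filter_cons, h]
    · have hb : (tag == a.2) = false := by simpa using Ne.symm h
      have hb2 : (a.2 == tag) = false := by simpa using h
      simp [List.filter_cons, hb, hb2]

-- ===== VERDICT (by name: the statement is the Claim_ definition above) =====
theorem validate_L3_08_spec : Claim_equal_validate_L3_08 := by
  intro st tl _
  unfold Spec_validate_L3_08 validate_L3_08 validate_L3_08_alt
  rw [pv_fold]
  simp only [Nat.zero_add, Bool.true_and, pv_ok_eq, pv_idxs_len, pv_index_bind,
    pv_contains_filter]
  have w0 := fun tag => pv_wordAt tl tag 0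
  have w1 := fun tag => pv_wordAt tl tag 1
  have w2 := fun tag => pv_wordAt tl tag 2
  have w3 := fun tag => pv_wordAt tl tag 3
  simp only [Nat.cast_zero, Nat.cast_one, Nat.cast_ofNat] at w0 w1 w2 w3
  rw [w0, w0, w1, w2, w3]
  simp only [← List.head?_filter, List.head?_eq_getElem?]
  -- abbreviate the filtered lists
  set V := tl.filter (fun p => p.2 == "var_name") with hV
  set F := tl.filter (fun p => p.2 == "function_name") with hF
  set O := tl.filter (fun p => p.2 == "operator_ari") with hO
  set N := tl.filter (fun p => p.2 == "number") with hN
  set I := tl.filter (fun p => p.2 == "int") with hI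
  set h0 := ((PySem.List.pyGet? tl 0).map (fun p => p.2) == some "int") with hh0
  by_cases cO : (0 < O.length)
  · by_cases cN : (0 < N.length)
    · rw [if_pos (by simp [cO, cN])]
      rw [pv_if_and, pv_if_and, pv_if_and, pv_if_and]
      simp only [Bool.and_true]
      trans (((V.length == 4) &&
          ((Option.map (fun p => p.1) V[0]? == some "humankey") &&
           ((Option.map (fun p => p.1) V[2]? == some "humankey") &&
            ((Option.map (fun p => p.1) V[1]? == some "finalkey") &&
             (Option.map (fun p => p.1) V[3]? == some "finalkey"))))) &&
        (((F.length == 1) && (Option.map (fun p => p.1) F[0]? == some "getkey")) &&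
         ((Option.map (fun p => p.1) O[0]? == some "+") &&
          ((Option.map (fun p => p.1) N[0]? == some "2") &&
           ((st == "function") && ((I.length == 3) && h0))))))
      · ac_rfl
      · rw [← pv_chkV4 V, ← pv_chkF1 F, ← pv_chkHead "+" O, ← pv_chkHead "2" N]
        ac_rfl
    · have hNf : decide (0 < N.length) = false := by simpa using cN
      rw [if_neg (by simp [hNf])]
      simp [hNf]
  · have hOf : decide (0 < O.length) = false := by simpa using cO
    rw [if_neg (by simp [hOf])]
    simp [hOf]
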